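-- pv_equiv track=rewrite | github.com/aidsuu/penq-pennylane | lattice_geometry_utils.py | square_vertical_pairs
-- ===== SOURCE A (Python) =====
-- def square_site_index(Lx, x, y):
--     if Lx < 1:
--         raise ValueError("Lx must be positive.")
--     if x < 0 or y < 0 or x >= Lx:
--         raise ValueError("square_site_index received out-of-range coordinates.")
--     return int(x + Lx * y)
--
-- def square_vertical_pairs(Lx, Ly):
--     if Lx < 1 or Ly < 1:
--         raise ValueError("Lx and Ly must be positive integers.")
--     pairs = []
--     for y in range(Ly - 1):
--         for x in range(Lx):
--             bottom = square_site_index(Lx, x, y)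
--             top = square_site_index(Lx, x, y + 1)
--             pairs.append((bottom, top))
--     return pairs
-- ===== SOURCE B (Python) =====
-- def square_vertical_pairs(Lx, Ly):
--     if Lx < 1 or Ly < 1:
--         raise ValueError("Lx and Ly must be positive integers.")
--     return [(i, i + Lx) for i in range(Lx * (Ly - 1))]
-- ===== Notes on version B (the rewrite author's own statement) =====
-- stated objective: simpler
-- what changed: Replaces the nested (y,x) loops and the bounds-checking helper square_site_index with a single flat comprehension over range(Lx*(Ly-1)) emitting (i, i+Lx), using that the bottom indices are exactly 0..Lx*(Ly-1)-1 and each top index is bottom+Lx; removes two guard checks per emitted pair.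
import Mathlib
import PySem

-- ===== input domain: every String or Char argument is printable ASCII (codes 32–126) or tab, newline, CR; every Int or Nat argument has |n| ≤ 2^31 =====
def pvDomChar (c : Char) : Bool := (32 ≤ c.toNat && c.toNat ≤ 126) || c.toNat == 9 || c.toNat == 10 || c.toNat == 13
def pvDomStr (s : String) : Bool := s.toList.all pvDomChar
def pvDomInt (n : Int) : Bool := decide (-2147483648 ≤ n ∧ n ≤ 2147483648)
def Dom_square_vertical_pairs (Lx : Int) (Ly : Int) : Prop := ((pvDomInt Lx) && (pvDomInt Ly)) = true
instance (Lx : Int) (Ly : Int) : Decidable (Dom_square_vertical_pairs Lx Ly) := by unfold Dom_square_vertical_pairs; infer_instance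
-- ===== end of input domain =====

-- B replaces the nested (y,x) loops and helper with one flat comprehension; equal return values proved on Pre_ (A and B both raise ValueError when Lx < 1 or Ly < 1, excluded by Pre_).
-- ===== PORT A =====
-- exception branches of A are unreachable inside Pre_; they are ported as dead `[]`/0 branches
def square_site_index (Lx : Int) (x : Int) (y : Int) : Int :=
  if Lx < 1 then 0  -- raise ValueError (excluded by Pre_)
  else if x < 0 ∨ y < 0 ∨ x ≥ Lx then 0  -- raise ValueError (never reached from the loops)
  else x + Lx * y

def square_vertical_pairs (Lx : Int) (Ly : Int) : List (Int × Int) :=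
  if Lx < 1 ∨ Ly < 1 then []  -- raise ValueError (excluded by Pre_)
  else
    (PySem.List.pyRange 0 (Ly - 1) 1).foldl (fun pairs y =>
      (PySem.List.pyRange 0 Lx 1).foldl (fun pairs x =>
        pairs ++ [(square_site_index Lx x y, square_site_index Lx x (y + 1))]) pairs) []

-- ===== PORT B =====
def square_vertical_pairs_alt (Lx : Int) (Ly : Int) : List (Int × Int) :=
  if Lx < 1 ∨ Ly < 1 then []  -- raise ValueError (excluded by Pre_)
  else (PySem.List.pyRange 0 (Lx * (Ly - 1)) 1).map (fun i => (i, i + Lx))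

-- ===== PRECONDITION & SPEC =====
-- A (and B) raise ValueError exactly when Lx < 1 or Ly < 1; those inputs are excluded.
def Pre_square_vertical_pairs (Lx : Int) (Ly : Int) : Prop := 1 ≤ Lx ∧ 1 ≤ Ly
instance (Lx : Int) (Ly : Int) : Decidable (Pre_square_vertical_pairs Lx Ly) := by unfold Pre_square_vertical_pairs; infer_instance
def pvWitness_square_vertical_pairs : Int × Int := (3, 4)

def Spec_square_vertical_pairs (Lx : Int) (Ly : Int) (out : List (Int × Int)) : Prop := out = square_vertical_pairs_alt Lx Ly
instance (Lx : Int) (Ly : Int) (out : List (Int × Int)) : Decidable (Spec_square_vertical_pairs Lx Ly out) := by unfold Spec_square_vertical_pairs; infer_instance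

-- ===== CLAIM (what is proved, stated in full; the proofs are below) =====
def Claim_equal_square_vertical_pairs : Prop := ∀ (Lx : Int) (Ly : Int), Dom_square_vertical_pairs Lx Ly → Pre_square_vertical_pairs Lx Ly → Spec_square_vertical_pairs Lx Ly (square_vertical_pairs Lx Ly)

-- ===== LEMMAS AND PROOFS =====

-- inside the loops the helper's guards never fire
lemma site_index_eval (Lx x y : Int) (hL : 1 ≤ Lx) (hx0 : 0 ≤ x) (hxL : x < Lx) (hy : 0 ≤ y) :
    square_site_index Lx x y = x + Lx * y := by
  unfold square_site_index
  rw [if_neg (by omega), if_neg (by push_neg; exact ⟨hx0, hy, hxL⟩)]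

-- one row y of A equals the slice [Lx*y, Lx*(y+1)) of B's flat range
lemma row_eq (Lx y : Int) (hL : 1 ≤ Lx) (hy : 0 ≤ y) :
    (PySem.List.pyRange 0 Lx 1).map
      (fun x => (square_site_index Lx x y, square_site_index Lx x (y + 1)))
    = (PySem.List.pyRange (Lx * y) (Lx * (y + 1)) 1).map (fun i => (i, i + Lx)) := by
  rw [PySem.List.pyRange_one 0 Lx, PySem.List.pyRange_one (Lx * y) (Lx * (y + 1))]
  have h1 : (Lx - 0).toNat = (Lx * (y + 1) - Lx * y).toNat := by
    congr 1; ring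
  rw [List.map_map, List.map_map, ← h1]
  apply List.map_congr_left
  intro k hk
  simp only [List.mem_range] at hk
  have hkx : (0:Int) ≤ (k:Int) := Int.natCast_nonneg k
  have hk' : k < (Lx - 0).toNat := by omega
  have hkL : (0:Int) + (k:Int) < Lx := by
    have h2 : ((Lx - 0).toNat : Int) = Lx - 0 := Int.toNat_of_nonneg (by omega)
    have h3 : ((k : Int)) < (((Lx - 0).toNat : Nat) : Int) := by exact_mod_cast hk'
    omega
  simp only [Function.comp_apply]
  rw [site_index_eval Lx _ y hL (by omega) (by omega) hy,
      site_index_eval Lx _ (y + 1) hL (by omega) (by omega) (by omega)]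
  simp only [Prod.mk.injEq]
  constructor <;> ring

-- flattening: n rows of width Lx equal the flat range of length Lx*n
lemma rows_eq (Lx : Int) (hL : 1 ≤ Lx) : ∀ (n : Nat),
    (PySem.List.pyRange 0 (n : Int) 1).flatMap
      (fun y => (PySem.List.pyRange 0 Lx 1).map
        (fun x => (square_site_index Lx x y, square_site_index Lx x (y + 1))))
    = (PySem.List.pyRange 0 (Lx * n) 1).map (fun i => (i, i + Lx)) := by
  intro n
  induction n with
  | zero => simp [PySem.List.pyRange_one_eq_nil]
  | succ n ih =>
    have hmul : Lx * (n : Int) ≤ Lx * ((n : Int) + 1) := by nlinarith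
    have hpos : (0:Int) ≤ Lx * (n : Int) := by positivity
    rw [show ((n + 1 : Nat) : Int) = (n : Int) + 1 by push_cast; ring,
        PySem.List.pyRange_one_succ_right (by positivity),
        List.flatMap_append,
        PySem.List.pyRange_one_append 0 (Lx * (n : Int)) (Lx * ((n : Int) + 1)) hpos hmul,
        List.map_append, ih]
    simp only [List.flatMap_cons, List.flatMap_nil, List.append_nil]
    rw [row_eq Lx (n : Int) hL (Int.natCast_nonneg n)]

-- ===== VERDICT (by name: the statement is the Claim_ definition above) =====
theorem square_vertical_pairs_spec : Claim_equal_square_vertical_pairs := by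
  intro Lx Ly _ hPre
  obtain ⟨hL, hY⟩ := hPre
  unfold Spec_square_vertical_pairs square_vertical_pairs square_vertical_pairs_alt
  rw [if_neg (by omega), if_neg (by omega)]
  have hinner : (fun (pairs : List (Int × Int)) (y : Int) =>
      (PySem.List.pyRange 0 Lx 1).foldl (fun pairs x =>
        pairs ++ [(square_site_index Lx x y, square_site_index Lx x (y + 1))]) pairs)
    = fun pairs y => pairs ++ (fun y => (PySem.List.pyRange 0 Lx 1).map
        (fun x => (square_site_index Lx x y, square_site_index Lx x (y + 1)))) y := by
    funext pairs y
    exact PySem.List.foldl_append_singleton_eq_map _ _ _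
  rw [hinner, PySem.List.foldl_append_eq_flatMap, List.nil_append]
  have hn : (Ly - 1) = (((Ly - 1).toNat : Nat) : Int) := by omega
  rw [hn, rows_eq Lx hL (Ly - 1).toNat]
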